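-- pv_equiv track=rewrite | github.com/joon6093/Algorithm_Study | 프로그래머스/2/150369. 택배 배달과 수거하기/택배 배달과 수거하기.py | solution
-- ===== SOURCE A (Python) =====
-- def solution(cap, n, deliveries, pickups):
--     answer = 0
--     corrent_deliveries_cap = 0
--     corrent_pickups_cap = 0
--     first = -1
--     for i in range(n-1, -1, -1):
--         if first == -1:
--             if deliveries[i] or pickups[i]:
--                 first = i
--                 answer += (i + 1) * 2
--         corrent_deliveries_cap += deliveries[i]
--         corrent_pickups_cap += pickups[i]
--
--         while(corrent_deliveries_cap > cap or corrent_pickups_cap > cap):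
--             corrent_pickups_cap -= cap
--             corrent_deliveries_cap -= cap
--             answer += (i + 1) * 2
--
--     return answer
-- ===== SOURCE B (Python) =====
-- def solution(cap, n, deliveries, pickups):
--     # farthest stop (as a 1-based distance) that needs any visit at all
--     first = next((i + 1 for i in range(n - 1, -1, -1)
--                   if deliveries[i] or pickups[i]), 0)
--     answer = 2 * first
--     d = p = trips = 0
--     for i in range(n - 1, -1, -1):
--         d += deliveries[i]
--         p += pickups[i]
--         # full trips (beyond the one final partial trip) needed to serve i..n-1
--         need = -(-max(d, p) // cap) - 1
--         if need > trips:
--             answer += (i + 1) * 2 * (need - trips)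
--             trips = need
--     return answer
-- ===== Notes on version B (the rewrite author's own statement) =====
-- stated objective: alternative
-- what changed: B replaces A's first-flag and carry-and-subtract inner while loop by a separate scan for the farthest visited stop plus one reverse pass that computes each stop's full-trip count in closed form (ceiling division of the suffix sums) and charges only the increase of a running maximum.
-- outside the precondition, e.g. on solution(0, 1, [0], [0]): A returns 0, B raises ZeroDivisionError
import Mathlib
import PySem

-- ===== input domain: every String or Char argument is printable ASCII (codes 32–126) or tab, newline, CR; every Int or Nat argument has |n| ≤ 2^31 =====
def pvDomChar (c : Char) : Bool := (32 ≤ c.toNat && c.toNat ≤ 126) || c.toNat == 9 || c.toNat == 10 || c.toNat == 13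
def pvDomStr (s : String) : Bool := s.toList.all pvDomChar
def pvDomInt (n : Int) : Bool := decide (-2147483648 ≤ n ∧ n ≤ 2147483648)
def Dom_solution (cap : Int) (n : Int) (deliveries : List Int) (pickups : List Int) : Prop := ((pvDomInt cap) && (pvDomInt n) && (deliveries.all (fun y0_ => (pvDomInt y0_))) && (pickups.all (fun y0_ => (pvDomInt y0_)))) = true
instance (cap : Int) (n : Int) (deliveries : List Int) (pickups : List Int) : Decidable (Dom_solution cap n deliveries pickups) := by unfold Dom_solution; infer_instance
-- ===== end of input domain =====

-- B replaces A's carry-and-subtract inner while loop by a closed-form ceiling-division of the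
-- suffix sums together with a running maximum of needed full trips (objective: alternative).

-- ===== PORT A =====
-- inner 'while corrent_deliveries_cap > cap or corrent_pickups_cap > cap' of A;
-- the '0 < cap' conjunct is a totality guard only: for cap ≤ 0 Python's while diverges
-- as soon as the condition holds (outside Pre_solution).
def whileA (cap i d p ans : Int) : Int × Int × Int :=
  if h : (cap < d ∨ cap < p) ∧ 0 < cap then
    whileA cap i (d - cap) (p - cap) (ans + (i + 1) * 2)
  else (d, p, ans)
termination_by (max d p - cap).toNat
decreasing_by omega

-- one iteration of A's for-loop; state = (answer, d, p, first);
-- the nested 'if first == -1: if deliveries[i] or pickups[i]:' is one conjunction here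
def stepA (cap : Int) (dv pv : Int → Int) (s : Int × Int × Int × Int) (i : Int) :
    Int × Int × Int × Int :=
  let ans1 := if s.2.2.2 = -1 ∧ (dv i ≠ 0 ∨ pv i ≠ 0) then s.1 + (i + 1) * 2 else s.1
  let fr1 := if s.2.2.2 = -1 ∧ (dv i ≠ 0 ∨ pv i ≠ 0) then i else s.2.2.2
  let r := whileA cap i (s.2.1 + dv i) (s.2.2.1 + pv i) ans1
  (r.2.2, r.1, r.2.1, fr1)

def solution (cap : Int) (n : Int) (deliveries : List Int) (pickups : List Int) : Int :=
  ((PySem.List.pyRange (n - 1) (-1) (-1)).foldl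
    (stepA cap (fun i => (PySem.List.pyGet? deliveries i).getD 0)
               (fun i => (PySem.List.pyGet? pickups i).getD 0))
    (0, 0, 0, -1)).1

-- ===== PORT B =====
-- one iteration of B's for-loop; state = (answer, d, p, trips)
def stepB (cap : Int) (dv pv : Int → Int) (s : Int × Int × Int × Int) (i : Int) :
    Int × Int × Int × Int :=
  let d := s.2.1 + dv i
  let p := s.2.2.1 + pv i
  let need := -(PySem.Int.floordiv (-(max d p)) cap) - 1
  if need > s.2.2.2 then (s.1 + (i + 1) * 2 * (need - s.2.2.2), d, p, need)
  else (s.1, d, p, s.2.2.2)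

def solution_alt (cap : Int) (n : Int) (deliveries : List Int) (pickups : List Int) : Int :=
  let dv := fun i => (PySem.List.pyGet? deliveries i).getD 0
  let pv := fun i => (PySem.List.pyGet? pickups i).getD 0
  let L := PySem.List.pyRange (n - 1) (-1) (-1)
  let first := ((L.find? (fun i => decide (dv i ≠ 0 ∨ pv i ≠ 0))).map (· + 1)).getD 0
  (L.foldl (stepB cap dv pv) (2 * first, 0, 0, 0)).1

-- ===== PRECONDITION & SPEC =====
-- Pre_ excludes cap ≤ 0 when any stop is visited (A's inner while loops forever once a suffix
-- load exceeds cap, and on its remaining all-zero inputs B's ceiling division raises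
-- ZeroDivisionError for cap = 0), and n exceeding either list's length (A raises IndexError).
def Pre_solution (cap : Int) (n : Int) (deliveries : List Int) (pickups : List Int) : Prop :=
  n ≤ 0 ∨ (1 ≤ cap ∧ n ≤ (deliveries.length : Int) ∧ n ≤ (pickups.length : Int))
instance (cap : Int) (n : Int) (deliveries : List Int) (pickups : List Int) : Decidable (Pre_solution cap n deliveries pickups) := by unfold Pre_solution; infer_instance

def pvWitness_solution : Int × Int × List Int × List Int := (4, 2, [1, 0], [0, 3])

def Spec_solution (cap : Int) (n : Int) (deliveries : List Int) (pickups : List Int) (out : Int) : Prop := out = solution_alt cap n deliveries pickups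
instance (cap : Int) (n : Int) (deliveries : List Int) (pickups : List Int) (out : Int) : Decidable (Spec_solution cap n deliveries pickups out) := by unfold Spec_solution; infer_instance

-- ===== CLAIM (what is proved, stated in full; the proofs are below) =====
def Claim_equal_solution : Prop := ∀ (cap : Int) (n : Int) (deliveries : List Int) (pickups : List Int), Dom_solution cap n deliveries pickups → Pre_solution cap n deliveries pickups → Spec_solution cap n deliveries pickups (solution cap n deliveries pickups)

-- ===== LEMMAS AND PROOFS =====

-- ceiling division -((-M) // c) shifts by k when M shifts by c * k
lemma ceil_shift (c M k : Int) (hc : 0 < c) :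
    -(PySem.Int.floordiv (-(M - c * k)) c) = -(PySem.Int.floordiv (-M) c) - k := by
  have h1 : -(M - c * k) = -M + k * c := by ring
  rw [h1, PySem.Int.floordiv_eq_ediv_of_pos hc, PySem.Int.floordiv_eq_ediv_of_pos hc,
      Int.add_mul_ediv_right _ _ (by omega : c ≠ 0)]
  ring

-- bounds of the ceiling q = -((-M) // c): (q-1)*c < M ≤ q*c
lemma ceil_bounds (c M : Int) (hc : 0 < c) :
    (-(PySem.Int.floordiv (-M) c) - 1) * c < M ∧ M ≤ -(PySem.Int.floordiv (-M) c) * c := by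
  have := (PySem.Int.neg_floordiv_neg_eq_iff_of_pos (a := M) (b := c)
    (q := -(PySem.Int.floordiv (-M) c)) hc).mp rfl
  omega

-- closed form for A's inner while loop (cap > 0)
lemma whileA_eq (cap i : Int) (hc : 0 < cap) : ∀ (d p ans : Int),
    whileA cap i d p ans =
      (d - cap * max 0 (-(PySem.Int.floordiv (-(max d p)) cap) - 1),
       p - cap * max 0 (-(PySem.Int.floordiv (-(max d p)) cap) - 1),
       ans + (i + 1) * 2 * max 0 (-(PySem.Int.floordiv (-(max d p)) cap) - 1)) := by
  intro d p ans
  induction hn : (max d p - cap).toNat using Nat.strong_induction_on generalizing d p ans with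
  | _ m ih =>
    rw [whileA]
    by_cases h : (cap < d ∨ cap < p) ∧ 0 < cap
    · rw [dif_pos h]
      have hm : max (d - cap) (p - cap) = max d p - cap := by omega
      have hq : -(PySem.Int.floordiv (-(max d p - cap)) cap)
          = -(PySem.Int.floordiv (-(max d p)) cap) - 1 := by
        have := ceil_shift cap (max d p) 1 hc
        simpa using this
      have hb := ceil_bounds cap (max d p) hc
      have hmax : cap < max d p := by omega
      -- cap < max d p, so the ceiling is ≥ 2
      have hq2 : 2 ≤ -(PySem.Int.floordiv (-(max d p)) cap) := by
        by_contra hcon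
        have h1 : -(PySem.Int.floordiv (-(max d p)) cap) ≤ 1 := by omega
        have h2 : (-(PySem.Int.floordiv (-(max d p)) cap)) * cap ≤ 1 * cap :=
          mul_le_mul_of_nonneg_right h1 (by omega)
        linarith [hb.2]
      rw [ih ((max (d - cap) (p - cap)) - cap).toNat (by omega) _ _ _ rfl]
      rw [hm, hq]
      have hw1 : max 0 (-(PySem.Int.floordiv (-(max d p)) cap) - 1)
          = max 0 (-(PySem.Int.floordiv (-(max d p)) cap) - 1 - 1) + 1 := by omega
      rw [hw1]
      simp only [Prod.mk.injEq]
      refine ⟨by ring, by ring, by ring⟩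
    · rw [dif_neg h]
      have hdp : d ≤ cap ∧ p ≤ cap := by
        rcases not_and_or.mp h with h1 | h1
        · push_neg at h1; exact h1
        · omega
      have hmax : max d p ≤ cap := by omega
      have hb := ceil_bounds cap (max d p) hc
      have hq1 : -(PySem.Int.floordiv (-(max d p)) cap) ≤ 1 := by
        by_contra hcon
        have h2 : 1 * cap ≤ (-(PySem.Int.floordiv (-(max d p)) cap) - 1) * cap :=
          mul_le_mul_of_nonneg_right (by omega) (by omega)
        linarith [hb.1]
      have hw : max 0 (-(PySem.Int.floordiv (-(max d p)) cap) - 1) = 0 := by omega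
      rw [hw]; ring_nf

-- phase 2: once 'first' is set, A's state is B's state shifted by cap * trips
lemma phase2 (cap : Int) (hc : 0 < cap) (dv pv : Int → Int) :
    ∀ (L : List Int) (ansA ansB D P T fr : Int), 0 ≤ T → fr ≠ -1 →
      (L.foldl (stepA cap dv pv) (ansA, D - cap * T, P - cap * T, fr)).1 - ansA
        = (L.foldl (stepB cap dv pv) (ansB, D, P, T)).1 - ansB := by
  intro L
  induction L with
  | nil => intro ansA ansB D P T fr _ _; simp
  | cons i L ih =>
    intro ansA ansB D P T fr hT hfr
    simp only [List.foldl_cons]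
    have hstepA : stepA cap dv pv (ansA, D - cap * T, P - cap * T, fr) i
        = (ansA + (i + 1) * 2 * (max T (-(PySem.Int.floordiv (-(max (D + dv i) (P + pv i))) cap) - 1) - T),
           (D + dv i) - cap * max T (-(PySem.Int.floordiv (-(max (D + dv i) (P + pv i))) cap) - 1),
           (P + pv i) - cap * max T (-(PySem.Int.floordiv (-(max (D + dv i) (P + pv i))) cap) - 1),
           fr) := by
      have hni : ¬(fr = -1 ∧ (dv i ≠ 0 ∨ pv i ≠ 0)) := fun hco => hfr hco.1
      simp only [stepA, if_neg hni]
      have harg : D - cap * T + dv i = (D + dv i) - cap * T := by ring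
      have harg2 : P - cap * T + pv i = (P + pv i) - cap * T := by ring
      rw [harg, harg2, whileA_eq cap i hc]
      have hm : max ((D + dv i) - cap * T) ((P + pv i) - cap * T)
          = max (D + dv i) (P + pv i) - cap * T := by omega
      rw [hm, ceil_shift cap (max (D + dv i) (P + pv i)) T hc]
      have hw : max 0 (-(PySem.Int.floordiv (-(max (D + dv i) (P + pv i))) cap) - T - 1)
          = max T (-(PySem.Int.floordiv (-(max (D + dv i) (P + pv i))) cap) - 1) - T := by omega
      rw [hw]
      refine Prod.ext ?_ (Prod.ext ?_ (Prod.ext ?_ ?_)) <;> (try dsimp only) <;> (try simp only [zero_add]) <;> (first | rfl | ring)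
    have hstepB : stepB cap dv pv (ansB, D, P, T) i
        = (ansB + (i + 1) * 2 * (max T (-(PySem.Int.floordiv (-(max (D + dv i) (P + pv i))) cap) - 1) - T),
           D + dv i, P + pv i,
           max T (-(PySem.Int.floordiv (-(max (D + dv i) (P + pv i))) cap) - 1)) := by
      simp only [stepB]
      by_cases hgt : -(PySem.Int.floordiv (-(max (D + dv i) (P + pv i))) cap) - 1 > T
      · rw [if_pos hgt]
        have : max T (-(PySem.Int.floordiv (-(max (D + dv i) (P + pv i))) cap) - 1)
            = -(PySem.Int.floordiv (-(max (D + dv i) (P + pv i))) cap) - 1 := by omega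
        rw [this]
      · rw [if_neg hgt]
        have hmx : max T (-(PySem.Int.floordiv (-(max (D + dv i) (P + pv i))) cap) - 1) = T := by omega
        rw [hmx]
        simp
    rw [hstepA, hstepB]
    have := ih (ansA + (i + 1) * 2 * (max T (-(PySem.Int.floordiv (-(max (D + dv i) (P + pv i))) cap) - 1) - T))
      (ansB + (i + 1) * 2 * (max T (-(PySem.Int.floordiv (-(max (D + dv i) (P + pv i))) cap) - 1) - T))
      (D + dv i) (P + pv i)
      (max T (-(PySem.Int.floordiv (-(max (D + dv i) (P + pv i))) cap) - 1)) fr (by omega) hfr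
    omega

-- the two folds agree from their initial states (phase 1: leading all-zero stops)
lemma loop_eq (cap : Int) (hc : 0 < cap) (dv pv : Int → Int) :
    ∀ (L : List Int), (∀ i ∈ L, 0 ≤ i) →
      (L.foldl (stepA cap dv pv) (0, 0, 0, -1)).1
        = (L.foldl (stepB cap dv pv)
            (2 * (((L.find? (fun i => decide (dv i ≠ 0 ∨ pv i ≠ 0))).map (· + 1)).getD 0),
             0, 0, 0)).1 := by
  intro L
  induction L with
  | nil => simp
  | cons i L ih =>
    intro hpos
    have hi : (0 : Int) ≤ i := hpos i (List.mem_cons_self ..)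
    have hq00 : PySem.Int.floordiv (0 : Int) cap = 0 := by
      rw [PySem.Int.floordiv_eq_ediv_of_pos hc]; simp
    by_cases hz : dv i ≠ 0 ∨ pv i ≠ 0
    · -- the head stop is the farthest visited stop
      have hfind : ((i :: L).find? (fun i => decide (dv i ≠ 0 ∨ pv i ≠ 0))) = some i := by
        simp [hz]
      rw [hfind]
      simp only [List.foldl_cons, Option.map_some, Option.getD_some]
      have hstepA : stepA cap dv pv (0, 0, 0, -1) i
          = ((i + 1) * 2 + (i + 1) * 2 * max 0 (-(PySem.Int.floordiv (-(max (dv i) (pv i))) cap) - 1),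
             dv i - cap * max 0 (-(PySem.Int.floordiv (-(max (dv i) (pv i))) cap) - 1), pv i - cap * max 0 (-(PySem.Int.floordiv (-(max (dv i) (pv i))) cap) - 1), i) := by
        have hyes : ((0 : Int), (0 : Int), (0 : Int), (-1 : Int)).2.2.2 = -1
            ∧ (dv i ≠ 0 ∨ pv i ≠ 0) := ⟨rfl, hz⟩
        simp only [stepA, if_pos hyes,
          if_pos (show True ∧ (dv i ≠ 0 ∨ pv i ≠ 0) from ⟨trivial, hz⟩)]
        rw [whileA_eq cap i hc]
        refine Prod.ext ?_ (Prod.ext ?_ (Prod.ext ?_ ?_)) <;> (try dsimp only) <;> (try simp only [zero_add]) <;> (first | rfl | ring)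
      have hstepB : stepB cap dv pv (2 * (i + 1), 0, 0, 0) i
          = ((i + 1) * 2 + (i + 1) * 2 * max 0 (-(PySem.Int.floordiv (-(max (dv i) (pv i))) cap) - 1), dv i, pv i, max 0 (-(PySem.Int.floordiv (-(max (dv i) (pv i))) cap) - 1)) := by
        simp only [stepB]
        (try dsimp only)
        simp only [zero_add]
        by_cases hgt : -(PySem.Int.floordiv (-(max (dv i) (pv i))) cap) - 1 > 0
        · rw [if_pos hgt]
          have h1 : max 0 (-(PySem.Int.floordiv (-(max (dv i) (pv i))) cap) - 1) = -(PySem.Int.floordiv (-(max (dv i) (pv i))) cap) - 1 := by omega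
          rw [h1]
          refine Prod.ext ?_ (Prod.ext ?_ (Prod.ext ?_ ?_)) <;> (try dsimp only) <;> (try simp only [zero_add]) <;> (first | rfl | ring)
        · rw [if_neg hgt]
          have h1 : max 0 (-(PySem.Int.floordiv (-(max (dv i) (pv i))) cap) - 1) = 0 := by omega
          rw [h1]
          refine Prod.ext ?_ (Prod.ext ?_ (Prod.ext ?_ ?_)) <;> (try dsimp only) <;> (try simp only [zero_add]) <;> (first | rfl | ring)
      rw [hstepA, hstepB]
      have hfr : i ≠ -1 := by omega
      have hph := phase2 cap hc dv pv L
        ((i + 1) * 2 + (i + 1) * 2 * max 0 (-(PySem.Int.floordiv (-(max (dv i) (pv i))) cap) - 1))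
        ((i + 1) * 2 + (i + 1) * 2 * max 0 (-(PySem.Int.floordiv (-(max (dv i) (pv i))) cap) - 1))
        (dv i) (pv i) (max 0 (-(PySem.Int.floordiv (-(max (dv i) (pv i))) cap) - 1)) i (by omega) hfr
      omega
    · -- a zero stop before the farthest visited one: both folds keep their state
      push_neg at hz
      have hfind : ((i :: L).find? (fun i => decide (dv i ≠ 0 ∨ pv i ≠ 0)))
          = L.find? (fun i => decide (dv i ≠ 0 ∨ pv i ≠ 0)) := by
        simp [hz.1, hz.2]
      rw [hfind]
      simp only [List.foldl_cons]
      have hno : ¬(((0 : Int), (0 : Int), (0 : Int), (-1 : Int)).2.2.2 = -1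
          ∧ (dv i ≠ 0 ∨ pv i ≠ 0)) :=
        fun hco => hco.2.elim (fun h => h hz.1) (fun h => h hz.2)
      have hstepA : stepA cap dv pv (0, 0, 0, -1) i = (0, 0, 0, -1) := by
        simp only [stepA, if_neg hno]
        rw [whileA_eq cap i hc]
        (try dsimp only)
        rw [hz.1, hz.2]
        norm_num [hq00]
      have hstepB : ∀ a : Int, stepB cap dv pv (a, 0, 0, 0) i = (a, 0, 0, 0) := by
        intro a
        simp only [stepB]
        (try dsimp only)
        rw [hz.1, hz.2]
        norm_num [hq00]
      rw [hstepA, hstepB]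
      exact ih (fun j hj => hpos j (List.mem_cons_of_mem _ hj))

-- ===== VERDICT (by name: the statement is the Claim_ definition above) =====
theorem solution_spec : Claim_equal_solution := by
  intro cap n deliveries pickups _ hpre
  unfold Spec_solution solution solution_alt
  rcases hpre with hn | ⟨hcap, _, _⟩
  · have : PySem.List.pyRange (n - 1) (-1) (-1) = [] :=
      PySem.List.pyRange_neg_one_eq_nil (by omega)
    simp [this]
  · simp only
    exact loop_eq cap (by omega) _ _ _
      (fun i hi => by
        have := (PySem.List.mem_pyRange_neg_one.mp hi).1
        omega)
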